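-- pv_equiv track=rewrite | github.com/moubezza85/EDT | backend/scripts/memetic.py | _holes
-- ===== SOURCE A (Python) =====
-- from typing import Any, Dict, List, Optional, Set, Tuple
--
-- def _holes(plan: Dict[str, Dict[str, List[int]]]) -> int:
--     pen = 0
--     for ent in plan:
--         for j in plan[ent]:
--             slots = sorted(plan[ent][j])
--             for i in range(len(slots) - 1):
--                 if slots[i + 1] - slots[i] > 1:
--                     pen += 1
--     return pen
-- ===== SOURCE B (Python) =====
-- def _holes(plan):
--     # alternative: per slot-list, build a set once and count run-starts (v with v-1 absent);
--     # gaps between consecutive runs = run-starts - 1 (duplicates never create gaps)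
--     pen = 0
--     for ent in plan:
--         for j in plan[ent]:
--             s = set(plan[ent][j])
--             if s:
--                 pen += sum(1 for v in s if v - 1 not in s) - 1
--     return pen
-- ===== Notes on version B (the rewrite author's own statement) =====
-- stated objective: alternative
-- what changed: Instead of sorting each slot list and scanning adjacent index pairs, B builds a set once per list and counts run-starts (values v with v-1 absent); the number of gaps is run-starts minus one.
import Mathlib
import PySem

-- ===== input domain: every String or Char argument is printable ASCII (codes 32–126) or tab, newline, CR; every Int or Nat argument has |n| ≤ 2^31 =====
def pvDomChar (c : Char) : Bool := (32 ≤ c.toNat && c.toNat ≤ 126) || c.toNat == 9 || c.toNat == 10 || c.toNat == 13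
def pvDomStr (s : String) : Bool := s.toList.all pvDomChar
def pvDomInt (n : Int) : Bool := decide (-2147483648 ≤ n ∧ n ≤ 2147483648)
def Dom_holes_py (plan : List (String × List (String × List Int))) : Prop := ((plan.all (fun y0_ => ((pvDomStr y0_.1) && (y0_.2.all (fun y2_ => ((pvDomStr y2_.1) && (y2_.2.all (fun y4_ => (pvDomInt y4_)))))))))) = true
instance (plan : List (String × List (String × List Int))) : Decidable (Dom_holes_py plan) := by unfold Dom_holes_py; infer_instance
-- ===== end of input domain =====

-- B counts, per slot list, the run-starts of the value set (v with v-1 absent) instead of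
-- sorting and scanning adjacent index pairs; gaps = run-starts - 1 on a nonempty list.

-- ===== PORT A =====
def holes_py (plan : List (String × List (String × List Int))) : Int :=
  plan.foldl (fun pen e =>
    e.2.foldl (fun pen d =>
      let slots := PySem.List.sorted d.2 (fun x => x) false
      (PySem.List.pyRange 0 ((slots.length : Int) - 1) 1).foldl (fun pen i =>
        if PySem.List.pyGetD slots (i + 1) 0 - PySem.List.pyGetD slots i 0 > 1
        then pen + 1 else pen) pen) pen) 0

-- ===== PORT B =====
def holes_py_alt (plan : List (String × List (String × List Int))) : Int :=
  plan.foldl (fun pen e =>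
    e.2.foldl (fun pen d =>
      let s : PySem.Set Int := PySem.Set.ofList d.2
      if s = [] then pen
      else pen + ((s.countP (fun v => !(PySem.Set.contains s (v - 1))) : Int) - 1)) pen) 0

-- ===== PRECONDITION & SPEC =====
def Spec_holes_py (plan : List (String × List (String × List Int))) (out : Int) : Prop := out = holes_py_alt plan
instance (plan : List (String × List (String × List Int))) (out : Int) : Decidable (Spec_holes_py plan out) := by unfold Spec_holes_py; infer_instance

-- ===== CLAIM (what is proved, stated in full; the proofs are below) =====
def Claim_equal_holes_py : Prop := ∀ (plan : List (String × List (String × List Int))), Dom_holes_py plan → Spec_holes_py plan (holes_py plan)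

-- ===== LEMMAS AND PROOFS =====

def pvGaps : List Int → Int
  | a :: b :: t => (if b - a > 1 then 1 else 0) + pvGaps (b :: t)
  | _ => 0

theorem pvCountRange (s : List Int) :
    ((PySem.List.pyRange 0 ((s.length : Int) - 1) 1).countP (fun i =>
        decide (PySem.List.pyGetD s (i + 1) 0 - PySem.List.pyGetD s i 0 > 1)) : Int) = pvGaps s := by
  induction s with
  | nil => simp [pvGaps, PySem.List.pyRange_one_eq_nil]
  | cons a r ih =>
    cases r with
    | nil => simp [pvGaps, PySem.List.pyRange_one_eq_nil]
    | cons b t =>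
      have hlen : ((a :: b :: t).length : Int) - 1 = (t.length : Int) + 1 := by
        push_cast [List.length_cons]; ring
      rw [hlen, PySem.List.pyRange_one_cons (by positivity), List.countP_cons]
      have h1 : PySem.List.pyRange (0 + 1) ((t.length : Int) + 1) 1
          = (List.range t.length).map (fun k : Nat => 1 + (k : Int)) := by
        rw [PySem.List.pyRange_one]; norm_num
      have h0 : PySem.List.pyRange 0 (((b :: t).length : Int) - 1) 1
          = (List.range t.length).map (fun k : Nat => 0 + (k : Int)) := by
        rw [PySem.List.pyRange_one]; norm_num
      rw [h1, List.countP_map]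
      rw [h0, List.countP_map] at ih
      have hpred : ((fun i => decide (PySem.List.pyGetD (a :: b :: t) (i + 1) 0 - PySem.List.pyGetD (a :: b :: t) i 0 > 1)) ∘ (fun k : Nat => 1 + (k : Int)))
          = ((fun i => decide (PySem.List.pyGetD (b :: t) (i + 1) 0 - PySem.List.pyGetD (b :: t) i 0 > 1)) ∘ (fun k : Nat => 0 + (k : Int))) := by
        funext k
        simp only [Function.comp_apply]
        have A1 : PySem.List.pyGetD (a :: b :: t) (1 + (k : Int) + 1) 0
            = PySem.List.pyGetD (b :: t) (0 + (k : Int) + 1) 0 := by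
          rw [show (1 : Int) + (k : Int) + 1 = (((k + 1) + 1 : Nat) : Int) by push_cast; ring,
              show (0 : Int) + (k : Int) + 1 = ((k + 1 : Nat) : Int) by push_cast; ring,
              PySem.List.pyGetD_natCast, PySem.List.pyGetD_natCast]
          simp
        have A2 : PySem.List.pyGetD (a :: b :: t) (1 + (k : Int)) 0
            = PySem.List.pyGetD (b :: t) (0 + (k : Int)) 0 := by
          rw [show (1 : Int) + (k : Int) = ((k + 1 : Nat) : Int) by push_cast; ring,
              show (0 : Int) + (k : Int) = ((k : Nat) : Int) by simp,
              PySem.List.pyGetD_natCast, PySem.List.pyGetD_natCast]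
          simp
        rw [A1, A2]
      rw [hpred]
      push_cast
      rw [ih]
      have g1 : PySem.List.pyGetD (a :: b :: t) 1 0 = b := by
        rw [show (1 : Int) = ((1 : Nat) : Int) by simp, PySem.List.pyGetD_natCast]; simp
      have g0 : PySem.List.pyGetD (a :: b :: t) 0 0 = a := by
        have : (0 : Int) = ((0 : Nat) : Int) := by simp
        rw [this, PySem.List.pyGetD_natCast]; simp
      simp only [g0, g1, pvGaps, decide_eq_true_eq]
      split_ifs <;> ring

theorem pvLoopA_eq_gaps (s : List Int) (pen : Int) :
    (PySem.List.pyRange 0 ((s.length : Int) - 1) 1).foldl (fun pen i =>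
        if PySem.List.pyGetD s (i + 1) 0 - PySem.List.pyGetD s i 0 > 1
        then pen + 1 else pen) pen = pen + pvGaps s := by
  rw [PySem.List.foldl_ite_add_one, pvCountRange]

theorem pvGaps_eq_filter (s : List Int) (hs : s.Pairwise (· ≤ ·)) :
    pvGaps s = ((s.toFinset.filter (fun v => v - 1 ∉ s.toFinset)).card : Int)
                - (if s = [] then 0 else 1) := by
  induction s with
  | nil => simp [pvGaps]
  | cons a r ih =>
    cases r with
    | nil =>
      simp only [pvGaps, List.toFinset_cons, List.toFinset_nil, insert_empty_eq]
      rw [Finset.filter_singleton]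
      have : (a - 1 ∉ ({a} : Finset Int)) := by simp
      simp [this]
    | cons b t =>
      rw [List.pairwise_cons] at hs
      obtain ⟨ha, htl⟩ := hs
      have ih' := ih htl
      have hbt : ∀ x ∈ (b :: t).toFinset, b ≤ x := by
        intro x hx
        rw [List.mem_toFinset] at hx
        rcases List.mem_cons.mp hx with h | h
        · omega
        · exact (List.pairwise_cons.mp htl).1 x h
      by_cases hmem : a ∈ (b :: t).toFinset
      · -- a is a duplicate of the minimum b
        have hab : a = b := le_antisymm (ha b (List.mem_cons_self)) (hbt a hmem)
        have hS : (a :: b :: t).toFinset = (b :: t).toFinset := by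
          rw [List.toFinset_cons, Finset.insert_eq_self.mpr hmem]
        rw [hS]
        simp only [pvGaps]
        rw [ih']
        have : ¬ (b - a > 1) := by omega
        simp [this]
      · have hlt : ∀ x ∈ (b :: t).toFinset, a < x := by
          intro x hx
          refine lt_of_le_of_ne (ha x (List.mem_toFinset.mp hx)) (fun e => hmem ?_)
          rwa [e]
        have hS : (a :: b :: t).toFinset = insert a (b :: t).toFinset := List.toFinset_cons
        have haS : a - 1 ∉ (a :: b :: t).toFinset := by
          rw [hS, Finset.mem_insert]
          push Not
          refine ⟨by omega, fun h => ?_⟩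
          have := hlt _ h; omega
        have hab : a < b := hlt b (by simp)
        by_cases hgap : b - a > 1
        · have key : (a :: b :: t).toFinset.filter (fun v => v - 1 ∉ (a :: b :: t).toFinset)
              = insert a ((b :: t).toFinset.filter (fun v => v - 1 ∉ (b :: t).toFinset)) := by
            ext v
            simp only [Finset.mem_filter, Finset.mem_insert, hS]
            constructor
            · rintro ⟨hv | hv, hnv⟩
              · exact Or.inl hv
              · refine Or.inr ⟨hv, fun h => hnv (Or.inr h)⟩
            · rintro (rfl | ⟨hv, hnv⟩)
              · refine ⟨Or.inl rfl, ?_⟩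
                rintro (h | h)
                · omega
                · exact absurd (hlt _ h) (by omega)
              · have hbv := hbt v hv
                refine ⟨Or.inr hv, ?_⟩
                rintro (h | h)
                · omega
                · exact hnv h
          rw [key, Finset.card_insert_of_notMem (by
            simp only [Finset.mem_filter]
            rintro ⟨h, -⟩
            exact hmem h)]
          simp only [pvGaps]
          rw [ih']
          have : (b - a > 1) := hgap
          simp only [this, if_pos, List.cons_ne_nil]
          push_cast
          ring_nf
        · have hb1 : b = a + 1 := by omega
          have hbF : b ∈ (b :: t).toFinset.filter (fun v => v - 1 ∉ (b :: t).toFinset) := by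
            simp only [Finset.mem_filter, List.mem_toFinset]
            refine ⟨by simp, fun h => ?_⟩
            have := hbt _ (List.mem_toFinset.mpr h); omega
          have key : (a :: b :: t).toFinset.filter (fun v => v - 1 ∉ (a :: b :: t).toFinset)
              = insert a (((b :: t).toFinset.filter (fun v => v - 1 ∉ (b :: t).toFinset)).erase b) := by
            ext v
            simp only [Finset.mem_filter, Finset.mem_insert, Finset.mem_erase, hS]
            constructor
            · rintro ⟨hv | hv, hnv⟩
              · exact Or.inl hv
              · refine Or.inr ⟨fun e => hnv ?_, hv, fun h => hnv (Or.inr h)⟩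
                rw [e, hb1]
                exact Or.inl (by ring)
            · rintro (rfl | ⟨hvb, hv, hnv⟩)
              · refine ⟨Or.inl rfl, ?_⟩
                rintro (h | h)
                · omega
                · exact absurd (hlt _ h) (by omega)
              · refine ⟨Or.inr hv, ?_⟩
                rintro (h | h)
                · apply hvb; omega
                · exact hnv h
          rw [key, Finset.card_insert_of_notMem (by
            simp only [Finset.mem_erase, Finset.mem_filter]
            rintro ⟨-, h, -⟩
            exact hmem h), Finset.card_erase_of_mem hbF]
          simp only [pvGaps]
          rw [ih']
          have hcard : 1 ≤ ((b :: t).toFinset.filter (fun v => v - 1 ∉ (b :: t).toFinset)).card :=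
            Finset.card_pos.mpr ⟨b, hbF⟩
          have : ¬ (b - a > 1) := by omega
          simp only [this, List.cons_ne_nil]
          push_cast [hcard]
          omega

theorem pvCountB_eq_filter (l : List Int) :
    ((PySem.Set.ofList l).countP (fun v => !(PySem.Set.contains (PySem.Set.ofList l) (v - 1))) : Int)
      = ((l.toFinset.filter (fun v => v - 1 ∉ l.toFinset)).card : Int) := by
  have hnd : (PySem.Set.ofList l).Nodup := PySem.Set.nodup_ofList l
  congr 1
  rw [List.countP_eq_length_filter]
  rw [← List.toFinset_card_of_nodup (hnd.filter _)]
  congr 1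
  ext v
  simp [PySem.Set.mem_ofList]

theorem pvOfList_nil_iff (l : List Int) : (PySem.Set.ofList l : PySem.Set Int) = [] ↔ l = [] := by
  cases l with
  | nil => simp [PySem.Set.ofList_nil]
  | cons x xs => rw [PySem.Set.ofList_cons]; simp

theorem pvInner_eq (l : List Int) (pen : Int) :
    (PySem.List.pyRange 0 (((PySem.List.sorted l (fun x => x) false).length : Int) - 1) 1).foldl
        (fun pen i =>
          if PySem.List.pyGetD (PySem.List.sorted l (fun x => x) false) (i + 1) 0
              - PySem.List.pyGetD (PySem.List.sorted l (fun x => x) false) i 0 > 1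
          then pen + 1 else pen) pen
    = (if (PySem.Set.ofList l : PySem.Set Int) = [] then pen
       else pen + (((PySem.Set.ofList l : PySem.Set Int).countP
              (fun v => !(PySem.Set.contains (PySem.Set.ofList l) (v - 1))) : Int) - 1)) := by
  have hp : (PySem.List.sorted l (fun x => x) false).Pairwise (· ≤ ·) := by
    simpa using PySem.List.sorted_pairwise (xs := l) (key := fun x => x)
  rw [pvLoopA_eq_gaps, pvGaps_eq_filter _ hp]
  have htf : (PySem.List.sorted l (fun x => x) false).toFinset = l.toFinset := by
    ext v
    simp [List.mem_toFinset, PySem.List.mem_sorted]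
  by_cases hl : l = []
  · subst hl
    have h1 : PySem.List.sorted ([] : List Int) (fun x => x) false = [] := by
      rw [PySem.List.sorted_eq_nil_iff]
    have h2 : (PySem.Set.ofList ([] : List Int) : PySem.Set Int) = [] := by
      rw [pvOfList_nil_iff]
    simp [h1, h2]
  · have h1 : PySem.List.sorted l (fun x => x) false ≠ [] := by
      rw [Ne, PySem.List.sorted_eq_nil_iff]; exact hl
    have h2 : (PySem.Set.ofList l : PySem.Set Int) ≠ [] := by
      rw [Ne, pvOfList_nil_iff]; exact hl
    rw [if_neg h1, if_neg h2, htf, ← pvCountB_eq_filter]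

-- ===== VERDICT (by name: the statement is the Claim_ definition above) =====
theorem holes_py_spec : Claim_equal_holes_py := by
  intro plan _
  unfold Spec_holes_py holes_py holes_py_alt
  congr 1
  funext pen e
  congr 1
  funext pen d
  exact pvInner_eq d.2 pen
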